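-- pv_equiv track=rewrite | github.com/mychillingorganization/SecureMail | file_module/file_module/yara_scanner.py | _severity_from_tags
-- ===== SOURCE A (Python) =====
-- def _severity_from_tags(tags: list[str]) -> str:
--     """Fallback: Suy ra severity từ YARA tags."""
--     tags_lower = {t.lower() for t in tags}
--     if "critical" in tags_lower:
--         return "critical"
--     if "high" in tags_lower or "malware" in tags_lower:
--         return "high"
--     if "medium" in tags_lower or "suspicious" in tags_lower:
--         return "medium"
--     return "low"
-- ===== SOURCE B (Python) =====
-- _SEV_PRIORITY = {"critical": 3, "high": 2, "malware": 2, "medium": 1, "suspicious": 1}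
-- _SEV_NAME = {3: "critical", 2: "high", 1: "medium"}
--
-- def _severity_from_tags(tags: list[str]) -> str:
--     rank = 0
--     for t in tags:
--         rank = max(rank, _SEV_PRIORITY.get(t.lower(), 0))
--     return _SEV_NAME.get(rank, "low")
-- ===== Notes on version B (the rewrite author's own statement) =====
-- stated objective: idiomatic
-- what changed: Replaced the set-building plus tiered membership cascade with a single max-reduction over a keyword→priority table, mapping the final rank back to its name.
import Mathlib
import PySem

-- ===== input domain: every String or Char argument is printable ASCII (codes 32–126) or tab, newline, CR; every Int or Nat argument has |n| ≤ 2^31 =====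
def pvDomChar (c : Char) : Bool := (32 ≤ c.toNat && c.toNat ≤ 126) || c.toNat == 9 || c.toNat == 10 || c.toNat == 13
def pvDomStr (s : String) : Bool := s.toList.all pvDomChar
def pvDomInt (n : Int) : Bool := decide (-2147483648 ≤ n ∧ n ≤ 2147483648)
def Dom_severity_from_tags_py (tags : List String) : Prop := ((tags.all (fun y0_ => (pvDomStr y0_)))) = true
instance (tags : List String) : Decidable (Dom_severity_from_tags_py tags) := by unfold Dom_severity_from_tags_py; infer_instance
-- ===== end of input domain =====

-- B replaces A's set-building plus tiered membership cascade by a single max-reduction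
-- over a keyword→priority table (more idiomatic; same cost).

-- ===== PORT A =====
def severity_from_tags_py (tags : List String) : String :=
  let tags_lower : PySem.Set String := PySem.Set.ofList (tags.map PySem.Str.lower)
  if tags_lower.contains "critical" then "critical"
  else if tags_lower.contains "high" || tags_lower.contains "malware" then "high"
  else if tags_lower.contains "medium" || tags_lower.contains "suspicious" then "medium"
  else "low"

-- ===== PORT B =====
def sevPriorityTable : PySem.Dict String Nat :=
  PySem.Dict.ofList [("critical", 3), ("high", 2), ("malware", 2), ("medium", 1), ("suspicious", 1)]

def sevNameTable : PySem.Dict Nat String :=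
  PySem.Dict.ofList [(3, "critical"), (2, "high"), (1, "medium")]

def severity_from_tags_py_alt (tags : List String) : String :=
  let rank := tags.foldl (fun rank t => max rank (sevPriorityTable.getD (PySem.Str.lower t) 0)) 0
  sevNameTable.getD rank "low"

-- ===== PRECONDITION & SPEC =====
def Spec_severity_from_tags_py (tags : List String) (out : String) : Prop := out = severity_from_tags_py_alt tags
instance (tags : List String) (out : String) : Decidable (Spec_severity_from_tags_py tags out) := by unfold Spec_severity_from_tags_py; infer_instance

-- ===== CLAIM (what is proved, stated in full; the proofs are below) =====
def Claim_equal_severity_from_tags_py : Prop := ∀ (tags : List String), Dom_severity_from_tags_py tags → Spec_severity_from_tags_py tags (severity_from_tags_py tags)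

-- ===== LEMMAS AND PROOFS =====

/-- The rank A's membership cascade assigns to a list of (already lowered) tags. -/
def sevRank (l : List String) : Nat :=
  if "critical" ∈ l then 3
  else if "high" ∈ l ∨ "malware" ∈ l then 2
  else if "medium" ∈ l ∨ "suspicious" ∈ l then 1
  else 0

lemma sevRank_cons (x : String) (l : List String) :
    sevRank (x :: l) = max (sevPriorityTable.getD x 0) (sevRank l) := by
  by_cases h1 : x = "critical"
  · subst h1
    rw [show sevPriorityTable.getD "critical" 0 = 3 from by decide]
    unfold sevRank
    simp only [List.mem_cons,
      show ¬("high" : String) = "critical" from by decide,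
      show ¬("malware" : String) = "critical" from by decide,
      show ¬("medium" : String) = "critical" from by decide,
      show ¬("suspicious" : String) = "critical" from by decide,
      true_or, if_true, false_or]
    split_ifs <;> omega
  · by_cases h2 : x = "high"
    · subst h2
      rw [show sevPriorityTable.getD "high" 0 = 2 from by decide]
      unfold sevRank
      simp only [List.mem_cons,
        show ¬("critical" : String) = "high" from by decide,
        show ¬("malware" : String) = "high" from by decide,
        show ¬("medium" : String) = "high" from by decide,
        show ¬("suspicious" : String) = "high" from by decide,
        true_or, if_true, false_or]
      split_ifs <;> omega
    · by_cases h3 : x = "malware"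
      · subst h3
        rw [show sevPriorityTable.getD "malware" 0 = 2 from by decide]
        unfold sevRank
        simp only [List.mem_cons,
          show ¬("critical" : String) = "malware" from by decide,
          show ¬("high" : String) = "malware" from by decide,
          show ¬("medium" : String) = "malware" from by decide,
          show ¬("suspicious" : String) = "malware" from by decide,
          true_or, or_true, if_true, false_or]
        split_ifs <;> omega
      · by_cases h4 : x = "medium"
        · subst h4
          rw [show sevPriorityTable.getD "medium" 0 = 1 from by decide]
          unfold sevRank
          simp only [List.mem_cons,
            show ¬("critical" : String) = "medium" from by decide,
            show ¬("high" : String) = "medium" from by decide,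
            show ¬("malware" : String) = "medium" from by decide,
            show ¬("suspicious" : String) = "medium" from by decide,
            true_or, if_true, false_or]
          split_ifs <;> omega
        · by_cases h5 : x = "suspicious"
          · subst h5
            rw [show sevPriorityTable.getD "suspicious" 0 = 1 from by decide]
            unfold sevRank
            simp only [List.mem_cons,
              show ¬("critical" : String) = "suspicious" from by decide,
              show ¬("high" : String) = "suspicious" from by decide,
              show ¬("malware" : String) = "suspicious" from by decide,
              show ¬("medium" : String) = "suspicious" from by decide,
              true_or, or_true, if_true, false_or]
            split_ifs <;> omega
          · have hitems : sevPriorityTable.items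
                = [("critical", 3), ("high", 2), ("malware", 2), ("medium", 1), ("suspicious", 1)] := by
              decide
            have e1 : ("critical" == x) = false := beq_eq_false_iff_ne.mpr (Ne.symm h1)
            have e2 : ("high" == x) = false := beq_eq_false_iff_ne.mpr (Ne.symm h2)
            have e3 : ("malware" == x) = false := beq_eq_false_iff_ne.mpr (Ne.symm h3)
            have e4 : ("medium" == x) = false := beq_eq_false_iff_ne.mpr (Ne.symm h4)
            have e5 : ("suspicious" == x) = false := beq_eq_false_iff_ne.mpr (Ne.symm h5)
            have hp : sevPriorityTable.getD x 0 = 0 := by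
              simp [PySem.Dict.getD, PySem.Dict.get?, hitems, List.find?, e1, e2, e3, e4, e5]
            rw [hp]
            unfold sevRank
            simp only [List.mem_cons,
              Ne.symm h1, Ne.symm h2, Ne.symm h3, Ne.symm h4, Ne.symm h5, false_or]
            split_ifs <;> omega

/-- B's fold computes `max acc (sevRank …)` of the lowered tags. -/
lemma fold_eq_sevRank (tags : List String) (acc : Nat) :
    tags.foldl (fun rank t => max rank (sevPriorityTable.getD (PySem.Str.lower t) 0)) acc
      = max acc (sevRank (tags.map PySem.Str.lower)) := by
  induction tags generalizing acc with
  | nil => simp [sevRank]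
  | cons t ts ih =>
    simp only [List.foldl_cons, List.map_cons, ih, sevRank_cons]
    omega

/-- A's cascade is the name of the rank of the lowered tags. -/
lemma A_eq_rankName (tags : List String) :
    severity_from_tags_py tags = sevNameTable.getD (sevRank (tags.map PySem.Str.lower)) "low" := by
  unfold severity_from_tags_py sevRank
  have hmem : ∀ (x : String) (l : List String), (PySem.Set.ofList l).contains x = decide (x ∈ l) := by
    intro x l
    simp [PySem.Set.contains, PySem.Set.mem_ofList]
  simp only [hmem, Bool.or_eq_true, decide_eq_true_eq]
  split_ifs with hc hh hm <;> decide

-- ===== VERDICT (by name: the statement is the Claim_ definition above) =====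
theorem severity_from_tags_py_spec : Claim_equal_severity_from_tags_py := by
  intro tags _
  unfold Spec_severity_from_tags_py severity_from_tags_py_alt
  rw [fold_eq_sevRank, Nat.max_eq_right (Nat.zero_le _), A_eq_rankName]
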